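-- pv_equiv track=rewrite | github.com/lsh0107/solving_algorithms | 프로그래머스/1/140108. 문자열 나누기/문자열 나누기.py | solution
-- ===== SOURCE A (Python) =====
-- def solution(s):
--     S = s
--     start = s[0]
--     char = []
--     x_count = 0
--     not_x_count = 0
--     idx = 0
--     while s:
--         if start == s[idx]:
--             #x = s[i]
--             x_count += 1
--             idx += 1
--         elif start != s[idx]:
--             #not_x = s[i]
--             not_x_count += 1
--             idx += 1
--
--         if x_count == not_x_count:
--             char.append(s[:x_count + not_x_count])
--             if ''.join(char) == S:
--                 break
--             if x_count + not_x_count < len(s):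
--                 s = s[x_count + not_x_count:]
--                 start = s[0]
--                 x_count, not_x_count, idx = 0, 0, 0
--
--         elif x_count + not_x_count == len(s):
--             char.append(s)
--             s = ''
--
--     return len(char)
-- ===== SOURCE B (Python) =====
-- def solution(s):
--     if not s:
--         return 0
--     pieces = 0
--     same = 0
--     diff = 0
--     head = None
--     for c in s:
--         if same == 0 and diff == 0:
--             head = c
--         if c == head:
--             same += 1
--         else:
--             diff += 1
--         if same == diff:
--             pieces += 1
--             same = diff = 0
--     if same or diff:
--         pieces += 1
--     return pieces
-- ===== Notes on version B (the rewrite author's own statement) =====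
-- stated objective: faster
-- what changed: B replaces A's repeated slicing/joining of the remaining string (rebuilding substrings and re-joining the chunk list every cut) with a single left-to-right pass over the characters keeping two counters and a piece count, so no substring is ever materialised.
-- crash fix: On the empty string A raises IndexError (s[0]); B returns 0. — e.g. on solution(""): A raises IndexError, B returns 0
import Mathlib
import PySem

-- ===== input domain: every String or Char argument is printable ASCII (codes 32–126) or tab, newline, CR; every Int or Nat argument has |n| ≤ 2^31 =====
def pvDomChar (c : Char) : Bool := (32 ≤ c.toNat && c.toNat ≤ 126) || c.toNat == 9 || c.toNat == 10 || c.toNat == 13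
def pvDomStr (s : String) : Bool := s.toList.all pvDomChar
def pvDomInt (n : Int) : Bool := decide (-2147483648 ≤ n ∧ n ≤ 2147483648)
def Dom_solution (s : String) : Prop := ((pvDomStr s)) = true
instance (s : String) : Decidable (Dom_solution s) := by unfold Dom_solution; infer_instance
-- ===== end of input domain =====

-- B is a single linear pass with two counters and no slicing; equivalence of return values is
-- proved on Pre_solution (nonempty strings; A raises IndexError on "").

-- ===== PORT A =====
-- Literal port of A's while-loop; the state (current string s, start, chunk list char,
-- x_count, not_x_count, idx) is A's state.  The two `none`/`[]` fallback branches are the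
-- points where Python would raise IndexError; they are unreachable for the loop's reachable
-- states (proved implicitly by the equivalence proof below).
def solLoopA (S : List Char) (s : List Char) (start : Char) (char : List (List Char))
    (x nx idx : Nat) : List (List Char) :=
  if s = [] then char                                   -- while s:
  else
    match hg : PySem.List.pyGet? s (idx : Int) with
    | none => char                                      -- s[idx] raises IndexError (dead)
    | some c =>
      let x' := if start = c then x + 1 else x
      let nx' := if start = c then nx else nx + 1
      let idx' := idx + 1
      if x' = nx' then
        let char' := char ++ [s.take (x' + nx')]        -- char.append(s[:x+nx]) (nonneg slice)
        if char'.flatten = S then char'                 -- if ''.join(char) == S: break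
        else if x' + nx' < s.length then
          match hd : s.drop (x' + nx') with             -- s = s[x+nx:] (nonneg slice)
          | [] => char'                                 -- s[0] raises IndexError (dead)
          | c0 :: t => solLoopA S (c0 :: t) c0 char' 0 0 0
        else solLoopA S s start char' x' nx' idx'
      else if x' + nx' = s.length then char ++ [s]      -- char.append(s); s = '' → loop exits
      else solLoopA S s start char x' nx' idx'
termination_by (s.length, s.length - idx)
decreasing_by
  · have hlen := List.length_drop (l := s) (i := x' + nx')
    rw [hd] at hlen
    have h1 : 1 ≤ x' + nx' := by simp only [x', nx']; split <;> omega
    exact Prod.Lex.left _ _ (by omega)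
  · have : (idx : Int) < s.length := by
      by_contra h
      have : PySem.List.pyGet? s (idx : Int) = none := by
        rw [PySem.List.pyGet?_natCast]
        simp; omega
      simp [this] at hg
    exact Prod.Lex.right _ (by omega)
  · have : (idx : Int) < s.length := by
      by_contra h
      have : PySem.List.pyGet? s (idx : Int) = none := by
        rw [PySem.List.pyGet?_natCast]
        simp; omega
      simp [this] at hg
    exact Prod.Lex.right _ (by omega)

def solution (s : String) : Int :=
  match s.toList with
  | [] => 0                                             -- start = s[0] raises IndexError (outside Pre_)
  | c :: t => ((solLoopA (c :: t) (c :: t) c [] 0 0 0).length : Int)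

-- ===== PORT B =====
def solLoopB : List Char → Int → Nat → Nat → Option Char → Int
  | [], pieces, same, diff, _ => if same ≠ 0 ∨ diff ≠ 0 then pieces + 1 else pieces
  | c :: rest, pieces, same, diff, head =>
    let head' := if same = 0 ∧ diff = 0 then some c else head
    let same' := if head' = some c then same + 1 else same
    let diff' := if head' = some c then diff else diff + 1
    if same' = diff' then solLoopB rest (pieces + 1) 0 0 head'
    else solLoopB rest pieces same' diff' head'

def solution_alt (s : String) : Int :=
  if s.toList = [] then 0 else solLoopB s.toList 0 0 0 none

-- ===== PRECONDITION & SPEC =====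
-- Pre_ excludes only the empty string, on which A raises IndexError (s[0]).
def Pre_solution (s : String) : Prop := s ≠ ""
instance (s : String) : Decidable (Pre_solution s) := by unfold Pre_solution; infer_instance
def pvWitness_solution : String := "aabbab"

-- On the empty string A raises IndexError (s[0]); B returns 0.
def Raises_solution (s : String) : Prop := s = ""
instance (s : String) : Decidable (Raises_solution s) := by unfold Raises_solution; infer_instance
def pvRaiseWitness_solution : String := ""
def pvRaiseWitnessOut_solution : Int := 0

def Spec_solution (s : String) (out : Int) : Prop := out = solution_alt s
instance (s : String) (out : Int) : Decidable (Spec_solution s out) := by unfold Spec_solution; infer_instance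

-- ===== CLAIM (what is proved, stated in full; the proofs are below) =====
def Claim_equal_solution : Prop := ∀ (s : String), Dom_solution s → Pre_solution s → Spec_solution s (solution s)
def Claim_raises_solution : Prop := (∀ (s : String), Dom_solution s → Raises_solution s → ¬ Pre_solution s) ∧ (Dom_solution (pvRaiseWitness_solution) ∧ Raises_solution (pvRaiseWitness_solution) ∧ solution_alt (pvRaiseWitness_solution) = pvRaiseWitnessOut_solution)

-- ===== LEMMAS AND PROOFS =====

-- The core simulation: A's loop, measured by the number of appended chunks, runs in lock-step
-- with B's single pass over the not-yet-consumed suffix `s.drop idx`.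
theorem loopEq (S s : List Char) (start : Char) (char : List (List Char))
    (x nx idx : Nat) (head : Option Char)
    (hidx : idx = x + nx) (hlt : idx < s.length)
    (hh : idx ≠ 0 → head = some start)
    (hstart : s.head? = some start)
    (hS : S = char.flatten ++ s) :
    ((solLoopA S s start char x nx idx).length : Int)
      = solLoopB (s.drop idx) (char.length : Int) x nx head := by
  have hsne : s ≠ [] := by intro h; simp [h] at hlt
  have hget : PySem.List.pyGet? s (idx : Int) = some s[idx] := by
    rw [PySem.List.pyGet?_natCast]; simp [hlt]
  have hdropc : s.drop idx = s[idx] :: s.drop (idx + 1) := List.drop_eq_getElem_cons hlt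
  have hhead' : (if x = 0 ∧ nx = 0 then some s[idx] else head) = some start := by
    by_cases h0 : idx = 0
    · have hx0 : x = 0 ∧ nx = 0 := by omega
      have : s[idx] = start := by
        subst h0
        cases s with
        | nil => simp at hsne
        | cons a t => simp at hstart; simp [hstart]
      simp [hx0, this]
    · have : ¬ (x = 0 ∧ nx = 0) := by omega
      simp [this, hh h0]
  have hflat : ∀ k : Nat, ((char ++ [s.take k]).flatten = S) ↔ s.length ≤ k := by
    intro k
    have h1 : (char ++ [s.take k]).flatten = char.flatten ++ s.take k := by simp
    rw [h1, hS]
    constructor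
    · intro h
      have := List.append_cancel_left h
      have hlen := congrArg List.length this
      simp at hlen
      omega
    · intro h
      rw [List.take_of_length_le h]
  rw [solLoopA.eq_def, hdropc, solLoopB]
  simp only [if_neg hsne]
  split
  · next hg => rw [hget] at hg; cases hg
  · next c hg =>
    rw [hget] at hg
    injection hg with hc
    subst hc
    rw [hhead']
    simp only [Option.some.injEq]
    by_cases hsc : start = s[idx]
    case pos =>
      simp only [if_pos hsc]
      by_cases hxn : x + 1 = nx
      case pos =>
        simp only [if_pos hxn]
        have hk : x + 1 + nx = idx + 1 := by omega
        rw [hk]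
        by_cases hend : idx + 1 = s.length
        · rw [if_pos ((hflat (idx + 1)).mpr (by omega))]
          have hrest : s.drop (idx + 1) = [] := by simp [hend]
          rw [hrest]
          simp [solLoopB]
        · rw [if_neg (by rw [hflat]; omega)]
          rw [if_pos (by omega)]
          split
          · next hd =>
            exfalso
            simp only [if_pos hsc] at hd
            rw [hk] at hd
            have := congrArg List.length hd
            simp at this
            omega
          · next c0 t hd =>
            simp only [if_pos hsc] at hd
            rw [hk] at hd
            have hIH := loopEq S (c0 :: t) c0 (char ++ [s.take (idx + 1)]) 0 0 0 (some start)
              rfl (by simp) (by simp) (by simp)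
              (by
                have h2 : s.take (idx + 1) ++ (c0 :: t) = s := by rw [← hd, List.take_append_drop]
                have h3 : (char ++ [s.take (idx + 1)]).flatten ++ (c0 :: t)
                    = char.flatten ++ (s.take (idx + 1) ++ (c0 :: t)) := by simp
                rw [h3, h2, hS])
            simpa [hd] using hIH
      case neg =>
        simp only [if_neg hxn]
        by_cases hend : x + 1 + nx = s.length
        · rw [if_pos hend]
          have hrest : s.drop (idx + 1) = [] := by
            have : s.length ≤ idx + 1 := by omega
            simp [this]
          rw [hrest]
          simp [solLoopB]
        · rw [if_neg hend]
          have hIH := loopEq S s start char (x + 1) nx (idx + 1) (some start)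
            (by omega) (by omega) (fun _ => rfl) hstart hS
          simpa using hIH
    case neg =>
      simp only [if_neg hsc]
      by_cases hxn : x = nx + 1
      case pos =>
        simp only [if_pos hxn]
        have hk : x + (nx + 1) = idx + 1 := by omega
        rw [hk]
        by_cases hend : idx + 1 = s.length
        · rw [if_pos ((hflat (idx + 1)).mpr (by omega))]
          have hrest : s.drop (idx + 1) = [] := by simp [hend]
          rw [hrest]
          simp [solLoopB]
        · rw [if_neg (by rw [hflat]; omega)]
          rw [if_pos (by omega)]
          split
          · next hd =>
            exfalso
            simp only [if_neg hsc] at hd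
            rw [hk] at hd
            have := congrArg List.length hd
            simp at this
            omega
          · next c0 t hd =>
            simp only [if_neg hsc] at hd
            rw [hk] at hd
            have hIH := loopEq S (c0 :: t) c0 (char ++ [s.take (idx + 1)]) 0 0 0 (some start)
              rfl (by simp) (by simp) (by simp)
              (by
                have h2 : s.take (idx + 1) ++ (c0 :: t) = s := by rw [← hd, List.take_append_drop]
                have h3 : (char ++ [s.take (idx + 1)]).flatten ++ (c0 :: t)
                    = char.flatten ++ (s.take (idx + 1) ++ (c0 :: t)) := by simp
                rw [h3, h2, hS])
            simpa [hd] using hIH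
      case neg =>
        simp only [if_neg hxn]
        by_cases hend : x + (nx + 1) = s.length
        · rw [if_pos hend]
          have hrest : s.drop (idx + 1) = [] := by
            have : s.length ≤ idx + 1 := by omega
            simp [this]
          rw [hrest]
          simp [solLoopB]
        · rw [if_neg hend]
          have hIH := loopEq S s start char x (nx + 1) (idx + 1) (some start)
            (by omega) (by omega) (fun _ => rfl) hstart hS
          simpa using hIH
termination_by (s.length, s.length - idx)
decreasing_by
  all_goals first
    | exact Prod.Lex.right _ (by omega)
    | (rename_i heq
       have hlen := congrArg List.length heq
       simp at hlen
       split at hlen <;> exact Prod.Lex.left _ _ (by simp only [List.length_cons]; omega))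

-- ===== VERDICT (by name: the statement is the Claim_ definition above) =====
theorem solution_spec : Claim_equal_solution := by
  unfold Claim_equal_solution Spec_solution
  intro s _ hpre
  unfold solution solution_alt
  cases hl : s.toList with
  | nil =>
    exfalso
    apply hpre
    have := congrArg String.ofList hl
    simpa [String.ofList_toList] using this
  | cons c t =>
    have hIH := loopEq (c :: t) (c :: t) c [] 0 0 0 none rfl (by simp) (by simp) (by simp) (by simp)
    simpa using hIH

@[simp] theorem solution_raises : Claim_raises_solution := by
  unfold Claim_raises_solution
  exact ⟨fun s _ hr => by simp [Raises_solution] at hr; simp [Pre_solution, hr], by decide⟩
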